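-- pv_equiv track=rewrite | github.com/the-JJ/menza | menza.py | boldMenu
-- ===== SOURCE A (Python) =====
-- def boldMenu(menu):
-- 	startBold = '\033[1m'
-- 	endBold = '\033[0m'
--
-- 	menuList = menu.split('\n')
-- 	newMenu = ''
-- 	for x in menuList:
-- 		if (x.startswith("MENU")):
-- 			x = '\n' + startBold + x + endBold
-- 		newMenu += x + '\n'
-- 	return newMenu[:-1]
-- ===== SOURCE B (Python) =====
-- def boldMenu(menu):
--     # single left-to-right scan: locate each '\n' with find(start), wrap MENU-prefixed
--     # lines as they are emitted, join the pieces once at the end (no split, no trailing strip)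
--     out = []
--     i = 0
--     while True:
--         nl = menu.find('\n', i)
--         line = menu[i:] if nl == -1 else menu[i:nl]
--         if line.startswith('MENU'):
--             out.append('\n\033[1m' + line + '\033[0m')
--         else:
--             out.append(line)
--         if nl == -1:
--             return ''.join(out)
--         out.append('\n')
--         i = nl + 1
-- ===== Notes on version B (the rewrite author's own statement) =====
-- stated objective: alternative
-- what changed: Replaces the split-into-lines + string-accumulating loop + trailing-character strip with a single index-based scan that locates each newline via find(start), wraps MENU-prefixed lines as pieces are emitted, and joins once at the end, so no trailing newline is ever produced or stripped.
import Mathlib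
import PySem

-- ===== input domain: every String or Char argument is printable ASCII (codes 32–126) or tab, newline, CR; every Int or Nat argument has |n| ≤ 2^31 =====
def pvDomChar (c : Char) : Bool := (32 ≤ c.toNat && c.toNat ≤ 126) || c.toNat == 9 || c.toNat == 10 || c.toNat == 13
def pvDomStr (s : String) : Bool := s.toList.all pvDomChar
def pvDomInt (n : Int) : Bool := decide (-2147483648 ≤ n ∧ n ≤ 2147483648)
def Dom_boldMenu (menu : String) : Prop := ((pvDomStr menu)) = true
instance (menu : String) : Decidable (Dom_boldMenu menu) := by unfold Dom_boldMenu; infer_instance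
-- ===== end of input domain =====

-- B replaces A's split('\n')/accumulate/strip-last-char loop with a single index-based scan
-- (find each '\n' from the current position, wrap MENU lines as pieces are emitted, join once);
-- an alternative implementation of the same cost.

-- ===== PORT A =====
def boldMenu (menu : String) : String :=
  let startBold : List Char := ['\x1b', '[', '1', 'm']
  let endBold : List Char := ['\x1b', '[', '0', 'm']
  let menuList := PySem.Chars.splitOn menu.toList ['\n']
  let newMenu := menuList.foldl (fun newMenu x =>
    let x' := if PySem.Chars.startswith x ['M', 'E', 'N', 'U']
              then '\n' :: (startBold ++ x ++ endBold) else x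
    newMenu ++ (x' ++ ['\n'])) []
  String.ofList (PySem.List.slice newMenu none (some (-1)))

-- ===== PORT B =====
-- helper facts about menu.find('\n', i), cited by the port's termination proof
theorem pvFindGo (l : List Char) (k : Nat) :
    PySem.Chars.find.go ['\n'] l k =
      if '\n' ∈ l then ((k + (l.takeWhile (fun c => !(c == '\n'))).length : Nat) : Int) else -1 := by
  induction l generalizing k with
  | nil => simp [PySem.Chars.find.go]
  | cons c t ih =>
    rw [PySem.Chars.find.go]
    by_cases hc : c = '\n'
    · subst hc
      simp [List.isPrefixOf]
    · have hp : List.isPrefixOf ['\n'] (c :: t) = false := by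
        simp [List.isPrefixOf]; exact fun h => absurd h.symm hc
      simp only [hp, Bool.false_eq_true, if_false, ih]
      by_cases hm : '\n' ∈ t
      · simp [hm, hc]
        push_cast; ring
      · simp [hm, hc]
        exact fun h => absurd h.symm hc

theorem pvFindFrom_char (s : List Char) (i : Nat) (hi : i ≤ s.length) :
    PySem.Chars.findFrom s ['\n'] (i : Int) none =
      if '\n' ∈ s.drop i then ((i + ((s.drop i).takeWhile (fun c => !(c == '\n'))).length : Nat) : Int)
      else -1 := by
  rw [PySem.Chars.findFrom]
  have h1 : ¬ ((s.length : Int) < (i : Int)) := by exact_mod_cast not_lt.mpr hi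
  have h2 : ¬ ((i : Int) < 0) := by omega
  rw [PySem.Chars.find]
  simp only [h2, if_false, h1, Int.toNat_natCast, List.take_length, pvFindGo]
  by_cases hm : '\n' ∈ s.drop i
  · simp [hm]
  · simp [hm]

theorem pvTakeWhile_lt (l : List Char) (hm : '\n' ∈ l) :
    (l.takeWhile (fun c => !(c == '\n'))).length < l.length := by
  induction l with
  | nil => simp at hm
  | cons c t ih =>
    by_cases hc : c = '\n'
    · subst hc; simp [List.takeWhile_cons]
    · simp only [List.mem_cons] at hm
      rcases hm with h | h
      · exact absurd h.symm hc
      · simp [List.takeWhile_cons, hc]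
        exact ih h
        
theorem pvFindFrom_pos (s : List Char) (i : Nat)
    (h : PySem.Chars.findFrom s ['\n'] (i : Int) none ≠ -1) :
    (i : Int) ≤ PySem.Chars.findFrom s ['\n'] (i : Int) none ∧
      PySem.Chars.findFrom s ['\n'] (i : Int) none < s.length := by
  by_cases hi : i ≤ s.length
  · rw [pvFindFrom_char s i hi] at h ⊢
    by_cases hm : '\n' ∈ s.drop i
    · simp only [hm, if_true]
      have h1 := pvTakeWhile_lt (s.drop i) hm
      have h2 : (s.drop i).length = s.length - i := by simp
      constructor <;> [exact_mod_cast Nat.le_add_right i _; exact_mod_cast (by omega : i + (List.takeWhile (fun c => !(c == '\n')) (s.drop i)).length < s.length)]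
    · simp [hm] at h
  · exfalso
    apply h
    rw [PySem.Chars.findFrom]
    have h1 : ((s.length : Int) < (i : Int)) := by exact_mod_cast not_le.mp hi
    have h2 : ¬ ((i : Int) < 0) := by omega
    simp [h2, h1]
-- the loop of Source B: out = accumulated output pieces, i = current line start; nl = menu.find('\n', i)
def boldMenuGo (menu : List Char) (out : List Char) (i : Nat) : List Char :=
  let nl := PySem.Chars.findFrom menu ['\n'] (i : Int) none
  let line := if nl = -1 then PySem.List.slice menu (some (i : Int)) none
              else PySem.List.slice menu (some (i : Int)) (some nl)
  let out' := if PySem.Chars.startswith line ['M', 'E', 'N', 'U']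
              then out ++ ('\n' :: (['\x1b', '[', '1', 'm'] ++ line ++ ['\x1b', '[', '0', 'm']))
              else out ++ line
  if h : nl = -1 then out'
  else boldMenuGo menu (out' ++ ['\n']) (nl.toNat + 1)
termination_by menu.length - i
decreasing_by
  have hb := pvFindFrom_pos menu i h
  omega

def boldMenu_alt (menu : String) : String :=
  String.ofList (boldMenuGo menu.toList [] 0)

-- ===== PRECONDITION & SPEC =====
def Spec_boldMenu (menu : String) (out : String) : Prop := out = boldMenu_alt menu
instance (menu : String) (out : String) : Decidable (Spec_boldMenu menu out) := by unfold Spec_boldMenu; infer_instance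

-- ===== CLAIM (what is proved, stated in full; the proofs are below) =====
def Claim_equal_boldMenu : Prop := ∀ (menu : String), Dom_boldMenu menu → Spec_boldMenu menu (boldMenu menu)

-- ===== LEMMAS AND PROOFS =====

-- proof-side model of split('\n'): the list of lines of s
def pvLines (s : List Char) : List (List Char) :=
  let line := s.takeWhile (fun c => !(c == '\n'))
  let rest := s.dropWhile (fun c => !(c == '\n'))
  if rest.isEmpty then [line] else line :: pvLines rest.tail
termination_by s.length
decreasing_by
  have hle := List.length_dropWhile_le (fun c => !(c == '\n')) s
  have hne : ¬ (s.dropWhile (fun c => !(c == '\n'))).isEmpty := by assumption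
  simp only [List.isEmpty_iff] at hne
  have h1 : 1 ≤ (s.dropWhile (fun c => !(c == '\n'))).length := List.length_pos_of_ne_nil hne
  simp only [List.length_tail]
  omega

def pvConsHead (pre : List Char) : List (List Char) → List (List Char)
  | [] => [pre]
  | h :: t => (pre ++ h) :: t

theorem pvLines_unfold (s : List Char) :
    pvLines s = (if (s.dropWhile (fun c => !(c == '\n'))).isEmpty
                 then [s.takeWhile (fun c => !(c == '\n'))]
                 else s.takeWhile (fun c => !(c == '\n')) :: pvLines (s.dropWhile (fun c => !(c == '\n'))).tail) := by
  conv_lhs => unfold pvLines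

theorem pvLines_ne_nil (s : List Char) : pvLines s ≠ [] := by
  rw [pvLines_unfold]
  split <;> simp

theorem pvConsHead_nil (xs : List (List Char)) (hx : xs ≠ []) : pvConsHead [] xs = xs := by
  cases xs with
  | nil => exact absurd rfl hx
  | cons h t => simp [pvConsHead]

theorem pvConsHead_append (a b : List Char) (xs : List (List Char)) :
    pvConsHead (a ++ b) xs = pvConsHead a (pvConsHead b xs) := by
  cases xs <;> simp [pvConsHead]

theorem pvLines_cons_nl (rest : List Char) : pvLines ('\n' :: rest) = [] :: pvLines rest := by
  rw [pvLines_unfold ('\n' :: rest)]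
  have ht : List.takeWhile (fun c => !(c == '\n')) ('\n' :: rest) = [] := by
    simp [List.takeWhile_cons]
  have hd : List.dropWhile (fun c => !(c == '\n')) ('\n' :: rest) = '\n' :: rest := by
    simp [List.dropWhile_cons]
  rw [ht, hd]
  simp

theorem pvLines_cons_ne (c : Char) (rest : List Char) (hc : ¬ c = '\n') :
    pvLines (c :: rest) = pvConsHead [c] (pvLines rest) := by
  rw [pvLines_unfold (c :: rest), pvLines_unfold rest]
  have ht : List.takeWhile (fun x => !(x == '\n')) (c :: rest) = c :: List.takeWhile (fun x => !(x == '\n')) rest := by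
    simp [List.takeWhile_cons, hc]
  have hd : List.dropWhile (fun x => !(x == '\n')) (c :: rest) = List.dropWhile (fun x => !(x == '\n')) rest := by
    simp [List.dropWhile_cons, hc]
  rw [ht, hd]
  cases he : (List.dropWhile (fun x => !(x == '\n')) rest).isEmpty <;> simp [he, pvConsHead]

theorem pvSplitOn_go (fuel : Nat) (l cur : List Char) (acc : List (List Char))
    (hf : l.length < fuel) :
    PySem.Chars.splitOn.go ['\n'] fuel l cur acc = acc.reverse ++ pvConsHead cur.reverse (pvLines l) := by
  induction fuel generalizing l cur acc with
  | zero => omega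
  | succ f ih =>
    cases l with
    | nil =>
      rw [PySem.Chars.splitOn.go, pvLines_unfold]
      simp [pvConsHead]
      omega
    | cons c rest =>
      rw [PySem.Chars.splitOn.go]
      by_cases hc : c = '\n'
      · subst hc
        have hp : List.isPrefixOf ['\n'] ('\n' :: rest) = true := by simp [List.isPrefixOf]
        simp only [hp, if_true, List.drop_succ_cons, List.drop_zero, List.length_cons, List.length_nil] at *
        rw [ih rest [] (cur.reverse :: acc) (by omega), pvLines_cons_nl]
        simp only [List.reverse_nil]
        rw [pvConsHead_nil _ (pvLines_ne_nil rest)]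
        simp [pvConsHead]
      · have hp : List.isPrefixOf ['\n'] (c :: rest) = false := by
          simp [List.isPrefixOf]; exact fun h => absurd h.symm hc
        simp only [hp, Bool.false_eq_true, if_false]
        rw [ih rest (c :: cur) acc (by simp at hf; omega)]
        rw [pvLines_cons_ne c rest hc]
        simp [pvConsHead_append]

theorem pvSplitOn_eq (s : List Char) : PySem.Chars.splitOn s ['\n'] = pvLines s := by
  rw [PySem.Chars.splitOn, pvSplitOn_go (s.length + 1) s [] [] (by omega)]
  simp [pvConsHead_nil _ (pvLines_ne_nil s)]
def pvWrap (x : List Char) : List Char :=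
  if PySem.Chars.startswith x ['M', 'E', 'N', 'U']
  then '\n' :: (['\x1b', '[', '1', 'm'] ++ x ++ ['\x1b', '[', '0', 'm']) else x

theorem pvFlat_ne_nil (l : List Char) :
    (pvLines l).flatMap (fun x => pvWrap x ++ ['\n']) ≠ [] := by
  obtain ⟨h, t, he⟩ : ∃ h t, pvLines l = h :: t := by
    cases hx : pvLines l with
    | nil => exact absurd hx (pvLines_ne_nil l)
    | cons h t => exact ⟨h, t, rfl⟩
  rw [he]
  simp

theorem pvA_eq (menu : String) :
    boldMenu menu = String.ofList (((pvLines menu.toList).flatMap (fun x => pvWrap x ++ ['\n'])).dropLast) := by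
  unfold boldMenu
  dsimp only
  rw [pvSplitOn_eq, PySem.List.slice_to_neg_one]
  have hfe : (fun (newMenu x : List Char) =>
      newMenu ++ ((if PySem.Chars.startswith x ['M', 'E', 'N', 'U']
        then '\n' :: (['\x1b', '[', '1', 'm'] ++ x ++ ['\x1b', '[', '0', 'm']) else x) ++ ['\n'])) =
      (fun (acc x : List Char) => acc ++ (pvWrap x ++ ['\n'])) := by
    funext acc x
    rw [pvWrap]
  rw [hfe, PySem.List.foldl_append_eq_flatMap]
  simp

theorem pvGo_eq (menu : List Char) : ∀ (fl i : Nat) (out : List Char),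
    menu.length - i ≤ fl → i ≤ menu.length →
    boldMenuGo menu out i =
      out ++ (((pvLines (menu.drop i)).flatMap (fun x => pvWrap x ++ ['\n'])).dropLast) := by
  intro fl
  induction fl with
  | zero =>
    intro i out hfl hi
    have hieq : i = menu.length := by omega
    subst hieq
    unfold boldMenuGo
    have hm : ¬ ('\n' ∈ menu.drop menu.length) := by simp
    rw [pvFindFrom_char menu menu.length (le_refl _)]
    simp only [hm, if_false, dif_pos rfl, reduceIte]
    rw [PySem.List.slice_from_natCast]
    rw [pvLines_unfold]
    simp [pvWrap, PySem.Chars.startswith, List.isPrefixOf]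
  | succ f ih =>
    intro i out hfl hi
    unfold boldMenuGo
    rw [pvFindFrom_char menu i hi]
    by_cases hm : '\n' ∈ menu.drop i
    · simp only [hm, if_true]
      set rest := menu.drop i with hrest
      set k := (rest.takeWhile (fun c => !(c == '\n'))).length with hk
      have hklt : k < rest.length := pvTakeWhile_lt rest hm
      have hrl : rest.length = menu.length - i := by rw [hrest]; simp
      have hne : ((i + k : Nat) : Int) ≠ -1 := by omega
      have hcast : ((i + k : Nat) : Int) = ((i : Nat) : Int) + ((k : Nat) : Int) := by push_cast; ring
      have htn : ((i + k : Nat) : Int).toNat = i + k := by omega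
      rw [if_neg hne, dif_neg hne, htn, hcast, PySem.List.slice_natCast_add]
      have hline : List.take k rest = rest.takeWhile (fun c => !(c == '\n')) := by
        rw [hk]
        exact (List.prefix_iff_eq_take.mp (List.takeWhile_prefix _)).symm
      rw [hline]
      rw [ih (i + k + 1) _ (by omega) (by omega)]
      have hdrop : menu.drop (i + k + 1) = rest.drop (k + 1) := by
        rw [hrest, List.drop_drop]
        congr 1
      have hdw : rest.dropWhile (fun c => !(c == '\n')) = rest.drop k := by
        have h1 : List.drop k (rest.takeWhile (fun c => !(c == '\n')) ++ rest.dropWhile (fun c => !(c == '\n'))) = rest.dropWhile (fun c => !(c == '\n')) := by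
          rw [hk]
          exact List.drop_left
        rw [← h1, List.takeWhile_append_dropWhile]
      have hlines : pvLines rest = rest.takeWhile (fun c => !(c == '\n')) :: pvLines (rest.drop (k + 1)) := by
        rw [pvLines_unfold rest, hdw]
        have hne2 : (rest.drop k).isEmpty = false := by
          simp [List.isEmpty_iff, List.drop_eq_nil_iff]
          omega
        rw [hne2]
        simp [List.tail_drop]
      rw [hdrop, hlines]
      simp only [List.flatMap_cons]
      rw [List.dropLast_append_of_ne_nil (pvFlat_ne_nil _)]
      have hout : (if PySem.Chars.startswith (rest.takeWhile (fun c => !(c == '\n'))) ['M', 'E', 'N', 'U']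
            then out ++ ('\n' :: (['\x1b', '[', '1', 'm'] ++ rest.takeWhile (fun c => !(c == '\n')) ++ ['\x1b', '[', '0', 'm']))
            else out ++ rest.takeWhile (fun c => !(c == '\n'))) = out ++ pvWrap (rest.takeWhile (fun c => !(c == '\n'))) := by
        rw [pvWrap]
        split <;> rfl
      rw [hout]
      simp [List.append_assoc]
    · simp only [hm, if_false, reduceIte, dite_true]
      rw [PySem.List.slice_from_natCast]
      have hdw : (menu.drop i).dropWhile (fun c => !(c == '\n')) = [] := by
        rw [List.dropWhile_eq_nil_iff]
        intro x hx
        simp only [Bool.not_eq_eq_eq_not, Bool.not_true, beq_eq_false_iff_ne, ne_eq]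
        exact fun hxe => hm (hxe ▸ hx)
      have htw : (menu.drop i).takeWhile (fun c => !(c == '\n')) = menu.drop i := by
        rw [List.takeWhile_eq_self_iff]
        intro x hx
        simp only [Bool.not_eq_eq_eq_not, Bool.not_true, beq_eq_false_iff_ne, ne_eq]
        exact fun hxe => hm (hxe ▸ hx)
      rw [pvLines_unfold, hdw, htw]
      simp only [List.isEmpty_nil, if_true, List.flatMap_cons, List.flatMap_nil, List.append_nil]
      have hout2 : (if PySem.Chars.startswith (menu.drop i) ['M', 'E', 'N', 'U']
            then out ++ ('\n' :: (['\x1b', '[', '1', 'm'] ++ menu.drop i ++ ['\x1b', '[', '0', 'm']))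
            else out ++ menu.drop i) = out ++ pvWrap (menu.drop i) := by
        rw [pvWrap]
        split <;> rfl
      rw [hout2, List.dropLast_concat]

-- ===== VERDICT (by name: the statement is the Claim_ definition above) =====
theorem boldMenu_spec : Claim_equal_boldMenu := by
  intro menu _
  unfold Spec_boldMenu boldMenu_alt
  rw [pvA_eq, pvGo_eq menu.toList menu.toList.length 0 [] (by omega) (by omega)]
  simp
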